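-- pv_equiv track=rewrite | github.com/codinglcy/Algorithm | 프로그래머스/unrated/155652. 둘만의 암호/둘만의 암호.py | solution
-- ===== SOURCE A (Python) =====
-- def solution(s, skip, index):
--     temp = []
--     sCodeList = list(map(ord,list(s)))
--     skipCodeSet = set(map(ord,list(skip)))
--
--     for a in sCodeList:
--         count = 0
--         changeA = a
--
--         while count<index:
--             if changeA<122:
--                 changeA = changeA + 1
--             else:
--                 changeA = 97
--
--             if changeA not in skipCodeSet:
--                 count = count + 1
--
--         temp.append(changeA)
--
--     answer = ''.join(list(map(chr,temp)))
--
--     return answer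
-- ===== SOURCE B (Python) =====
-- def solution(s, skip, index):
--     skipset = set(map(ord, skip))
--     avail = [c for c in range(97, 123) if c not in skipset]
--
--     def decode(a):
--         if index <= 0:
--             return a
--         seg = [c for c in range(a + 1, 123) if c not in skipset]
--         if index <= len(seg):
--             return seg[index - 1]
--         return avail[(index - len(seg) - 1) % len(avail)]
--
--     table = [chr(decode(a)) for a in range(127)]
--     return ''.join(table[ord(c)] for c in s)
-- ===== Notes on version B (the rewrite author's own statement) =====
-- stated objective: faster
-- what changed: B replaces A's per-character while loop (which steps index times through the alphabet, skipping skip letters) by a one-off 127-entry translation table computed with list indexing and modular arithmetic over the precomputed available alphabet, then translates s by O(1) table lookups.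
-- outside the precondition, e.g. on solution('', 'abcdefghijklmnopqrstuvwxyz', 1): A returns '', B raises ZeroDivisionError; on solution(' ', 'abcdefghijklmnopqrstuvwxyz', 1): A returns '!', B raises ZeroDivisionError
import Mathlib
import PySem

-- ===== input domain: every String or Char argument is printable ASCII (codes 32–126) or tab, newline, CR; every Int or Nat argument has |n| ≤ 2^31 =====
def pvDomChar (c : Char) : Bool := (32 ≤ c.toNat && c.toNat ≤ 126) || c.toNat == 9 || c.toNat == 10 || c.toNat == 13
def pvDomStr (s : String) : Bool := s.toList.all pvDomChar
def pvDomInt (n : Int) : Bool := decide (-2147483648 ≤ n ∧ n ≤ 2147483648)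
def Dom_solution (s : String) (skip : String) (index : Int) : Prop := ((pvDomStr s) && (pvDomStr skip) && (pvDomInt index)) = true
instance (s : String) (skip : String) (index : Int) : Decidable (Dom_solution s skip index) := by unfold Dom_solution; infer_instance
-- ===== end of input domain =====

-- B replaces A's per-character while loop (index steps each) by a translation table built once
-- with list indexing and modular arithmetic over the precomputed available alphabet.

-- ===== PORT A =====
-- the 'while count<index' loop of A; the fuel argument only makes the recursion total (A's loop
-- diverges outside Pre_); inside Pre_ the supplied fuel is always sufficient (proved below)
def solWhile (skipCodeSet : PySem.Set Int) (index : Int) : Nat → Int → Int → Int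
  | 0, _, changeA => changeA
  | fuel + 1, count, changeA =>
    if count < index then
      let c := if changeA < 122 then changeA + 1 else 97
      solWhile skipCodeSet index fuel (if PySem.Set.contains skipCodeSet c then count else count + 1) c
    else changeA

def solution (s : String) (skip : String) (index : Int) : String :=
  let sCodeList : List Int := s.toList.map (fun c => (c.toNat : Int))
  let skipCodeSet : PySem.Set Int := PySem.Set.ofList (skip.toList.map (fun c => (c.toNat : Int)))
  let temp : List Int := sCodeList.map (fun a => solWhile skipCodeSet index (123 + 26 * index.toNat) 0 a)
  String.ofList (temp.map (fun x => Char.ofNat x.toNat))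

-- ===== PORT B =====
def solAvail (skipset : PySem.Set Int) : List Int :=
  (PySem.List.pyRange 97 123 1).filter (fun c => !(PySem.Set.contains skipset c))

def solDecode (skipset : PySem.Set Int) (index : Int) (a : Int) : Int :=
  if index ≤ 0 then a
  else
    let seg := (PySem.List.pyRange (a + 1) 123 1).filter (fun c => !(PySem.Set.contains skipset c))
    if index ≤ (seg.length : Int) then (PySem.List.pyGet? seg (index - 1)).getD 0
    else (PySem.List.pyGet? (solAvail skipset)
            (PySem.Int.mod (index - (seg.length : Int) - 1) ((solAvail skipset).length : Int))).getD 0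

def solution_alt (s : String) (skip : String) (index : Int) : String :=
  let skipset : PySem.Set Int := PySem.Set.ofList (skip.toList.map (fun c => (c.toNat : Int)))
  let table : List Char := (PySem.List.pyRange 0 127 1).map (fun a => Char.ofNat (solDecode skipset index a).toNat)
  String.ofList (s.toList.map (fun c => (PySem.List.pyGet? table ((c.toNat : Int))).getD ' '))

-- ===== PRECONDITION & SPEC =====
-- Pre_ excludes index > 0 with skip containing all 26 lowercase letters: there A's while loop
-- diverges for every lowercase character (and returns only on degenerate inputs via non-letter
-- codes), while B raises ZeroDivisionError building its table.
def Pre_solution (s : String) (skip : String) (index : Int) : Prop :=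
  index ≤ 0 ∨ ∃ c ∈ PySem.List.pyRange 97 123 1, c ∉ (skip.toList.map (fun ch => (ch.toNat : Int)))
instance (s : String) (skip : String) (index : Int) : Decidable (Pre_solution s skip index) := by
  unfold Pre_solution; infer_instance
def pvWitness_solution : String × String × Int := ("ab", "xy", 3)

def Spec_solution (s : String) (skip : String) (index : Int) (out : String) : Prop := out = solution_alt s skip index
instance (s : String) (skip : String) (index : Int) (out : String) : Decidable (Spec_solution s skip index out) := by unfold Spec_solution; infer_instance

-- ===== CLAIM (what is proved, stated in full; the proofs are below) =====
def Claim_equal_solution : Prop := ∀ (s : String) (skip : String) (index : Int), Dom_solution s skip index → Pre_solution s skip index → Spec_solution s skip index (solution s skip index)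

-- ===== LEMMAS AND PROOFS =====

-- the successor map of A's loop body
def solStep (x : Int) : Int := if x < 122 then x + 1 else 97

-- the sequence of values changeA runs through, starting (exclusively) from x
def solTraj (x : Int) : Nat → List Int
  | 0 => []
  | k + 1 => solStep x :: solTraj (solStep x) k

def solIter : Nat → Int → Int
  | 0, x => x
  | k + 1, x => solIter k (solStep x)

theorem solWhile_stop (S : PySem.Set Int) (index : Int) (f : Nat) (count x : Int)
    (h : ¬ count < index) : solWhile S index f count x = x := by
  cases f <;> simp [solWhile, h]

-- A's loop returns the (index-count)-th value of the trajectory that is not in skip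
theorem solWhile_eq_get (S : PySem.Set Int) (index : Int) :
    ∀ (f : Nat) (x count : Int), count < index →
    ∀ r, ((solTraj x f).filter (fun v => !(PySem.Set.contains S v)))[(index - count).toNat - 1]? = some r →
    solWhile S index f count x = r := by
  intro f
  induction f with
  | zero => intro x count hlt r hr; simp [solTraj] at hr
  | succ f ih =>
    intro x count hlt r hr
    have hunf : solWhile S index (f + 1) count x
        = solWhile S index f (if PySem.Set.contains S (solStep x) then count else count + 1) (solStep x) := by
      simp only [solWhile, if_pos hlt]; rfl
    rw [hunf]
    have htr : solTraj x (f + 1) = solStep x :: solTraj (solStep x) f := rfl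
    rw [htr] at hr
    by_cases hc : PySem.Set.contains S (solStep x)
    · rw [if_pos hc]
      rw [List.filter_cons_of_neg (by simpa using hc)] at hr
      exact ih (solStep x) count hlt r hr
    · rw [if_neg hc]
      rw [List.filter_cons_of_pos (by simpa using hc)] at hr
      by_cases h2 : count + 1 < index
      · have hm : (index - count).toNat - 1 = ((index - (count + 1)).toNat - 1) + 1 := by omega
        rw [hm, List.getElem?_cons_succ] at hr
        exact ih (solStep x) (count + 1) h2 r hr
      · have hm : (index - count).toNat - 1 = 0 := by omega
        rw [hm, List.getElem?_cons_zero] at hr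
        obtain rfl : solStep x = r := by simpa using hr
        exact solWhile_stop S index f (count + 1) _ h2

theorem traj_append (x : Int) (i j : Nat) :
    solTraj x (i + j) = solTraj x i ++ solTraj (solIter i x) j := by
  induction i generalizing x with
  | zero => simp [solTraj, solIter]
  | succ i ih =>
    have : i + 1 + j = (i + j) + 1 := by omega
    rw [this]
    simp only [solTraj, solIter, ih (solStep x)]
    rfl

theorem traj_seg : ∀ (m : Nat) (x : Int), x + m = 122 →
    solTraj x m = PySem.List.pyRange (x + 1) 123 1 ∧ solIter m x = 122 := by
  intro m
  induction m with
  | zero =>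
    intro x h
    have hx : x = 122 := by omega
    subst hx
    constructor
    · simp [solTraj, PySem.List.pyRange_one_eq_nil]
    · simp [solIter]
  | succ m ih =>
    intro x h
    have hx : x < 122 := by omega
    have hstep : solStep x = x + 1 := by simp [solStep, hx]
    have h' : (x + 1) + (m : Int) = 122 := by push_cast at h ⊢; omega
    obtain ⟨h1, h2⟩ := ih (x + 1) h'
    refine ⟨?_, ?_⟩
    · show solStep x :: solTraj (solStep x) m = _
      rw [hstep, h1, ← PySem.List.pyRange_one_cons (by omega)]
    · show solIter m (solStep x) = 122
      rw [hstep]; exact h2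

theorem traj_cyc_once (x : Int) (hx : 122 ≤ x) :
    solTraj x 26 = PySem.List.pyRange 97 123 1 ∧ solIter 26 x = 122 := by
  have hstep : solStep x = 97 := by simp [solStep]; omega
  obtain ⟨h1, h2⟩ := traj_seg 25 97 (by norm_num)
  constructor
  · show solStep x :: solTraj (solStep x) 25 = _
    rw [hstep, h1, ← PySem.List.pyRange_one_cons (by norm_num)]
  · show solIter 25 (solStep x) = 122
    rw [hstep]; exact h2

theorem traj_cyc : ∀ (k : Nat) (x : Int), 122 ≤ x →
    solTraj x (26 * k) = (List.replicate k (PySem.List.pyRange 97 123 1)).flatten := by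
  intro k
  induction k with
  | zero => intro x _; simp [solTraj]
  | succ k ih =>
    intro x hx
    have : 26 * (k + 1) = 26 + 26 * k := by omega
    rw [this, traj_append]
    obtain ⟨h1, h2⟩ := traj_cyc_once x hx
    rw [h1, h2, ih 122 le_rfl]
    simp [List.replicate_succ]

-- the whole trajectory: the segment up to 'z', then full alphabet cycles
theorem traj_decomp (a : Int) (k : Nat) :
    solTraj a ((122 - a).toNat + 26 * k)
      = PySem.List.pyRange (a + 1) 123 1 ++ (List.replicate k (PySem.List.pyRange 97 123 1)).flatten := by
  rw [traj_append]
  by_cases ha : a ≤ 122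
  · obtain ⟨h1, h2⟩ := traj_seg (122 - a).toNat a (by omega)
    rw [h1, h2, traj_cyc k 122 le_rfl]
  · have hm : (122 - a).toNat = 0 := by omega
    rw [hm]
    simp only [solTraj, solIter, List.nil_append]
    have hnil : PySem.List.pyRange (a + 1) 123 1 = [] := PySem.List.pyRange_one_eq_nil (by omega)
    rw [traj_cyc k a (by omega), hnil]
    simp

theorem flatten_replicate_getElem? {α : Type} : ∀ (k : Nat) (L : List α) (j : Nat), j < k * L.length →
    (List.replicate k L).flatten[j]? = L[j % L.length]? := by
  intro k
  induction k with
  | zero => intro L j h; omega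
  | succ k ih =>
    intro L j h
    rw [List.replicate_succ, List.flatten_cons]
    by_cases hj : j < L.length
    · rw [List.getElem?_append_left hj, Nat.mod_eq_of_lt hj]
    · have hj' : L.length ≤ j := Nat.le_of_not_lt hj
      rw [Nat.succ_mul] at h
      rw [List.getElem?_append_right hj', ih L (j - L.length) (by omega)]
      congr 1
      conv_rhs => rw [show j = (j - L.length) + L.length by omega]
      rw [Nat.add_mod_right]

theorem filter_flatten_replicate {α : Type} (p : α → Bool) (L : List α) :
    ∀ (k : Nat), ((List.replicate k L).flatten).filter p = (List.replicate k (L.filter p)).flatten := by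
  intro k
  induction k with
  | zero => simp
  | succ k ih => simp [List.replicate_succ, List.filter_append, ih]

-- per-character agreement of the two ports, under Pre_
theorem char_eq (S : PySem.Set Int) (index : Int) (a : Int) (ha : 0 ≤ a)
    (hpre : index ≤ 0 ∨ solAvail S ≠ []) :
    solWhile S index (123 + 26 * index.toNat) 0 a = solDecode S index a := by
  by_cases hle : index ≤ 0
  · rw [solWhile_stop S index _ 0 a (by omega), solDecode, if_pos hle]
  · have hpos : 0 < index := by omega
    have havail : solAvail S ≠ [] := by
      rcases hpre with h | h
      · omega
      · exact h
    have hlenpos : 0 < (solAvail S).length := List.length_pos_of_ne_nil havail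
    have hnn : ((index.toNat : Int)) = index := Int.toNat_of_nonneg (by omega)
    set n := index.toNat with hn
    set p : Int → Bool := fun v => !(PySem.Set.contains S v) with hp
    set seg : List Int := (PySem.List.pyRange (a + 1) 123 1).filter p with hsegdef
    have hm122 : ((122 - a).toNat + 26 * n) ≤ 123 + 26 * n := by omega
    have hfil : (solTraj a (123 + 26 * n)).filter p
        = (seg ++ (List.replicate n (solAvail S)).flatten)
          ++ (solTraj (solIter ((122 - a).toNat + 26 * n) a) (123 + 26 * n - ((122 - a).toNat + 26 * n))).filter p := by
      conv_lhs => rw [show 123 + 26 * n = ((122 - a).toNat + 26 * n) + (123 + 26 * n - ((122 - a).toNat + 26 * n)) by omega]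
      rw [traj_append, List.filter_append, traj_decomp, List.filter_append, filter_flatten_replicate]
      rfl
    have hflatlen : ((List.replicate n (solAvail S)).flatten).length = n * (solAvail S).length := by
      simp [List.length_flatten]
    have hnle : n ≤ n * (solAvail S).length := Nat.le_mul_of_pos_right n hlenpos
    -- the value B computes, and the fact that A's loop hits it
    by_cases hc1 : index ≤ (seg.length : Int)
    · have hlt : n - 1 < seg.length := by omega
      have hB : solDecode S index a = seg[n - 1] := by
        rw [solDecode, if_neg hle]
        rw [if_pos hc1]
        have hidx : index - 1 = ((n - 1 : Nat) : Int) := by omega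
        rw [hidx, PySem.List.pyGet?_natCast, List.getElem?_eq_getElem hlt]
        rfl
      rw [hB]
      apply solWhile_eq_get S index _ a 0 (by omega)
      rw [show (index - 0).toNat - 1 = n - 1 by omega, hfil]
      rw [List.getElem?_append_left (by simp; omega), List.getElem?_append_left hlt,
          List.getElem?_eq_getElem hlt]
    · have hgt : seg.length < n := by omega
      have hj : n - 1 - seg.length < n * (solAvail S).length := by omega
      have hmodlt : (n - 1 - seg.length) % (solAvail S).length < (solAvail S).length :=
        Nat.mod_lt _ hlenpos
      have hB : solDecode S index a = (solAvail S)[(n - 1 - seg.length) % (solAvail S).length] := by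
        rw [solDecode, if_neg hle]
        rw [if_neg hc1]
        have hidx : index - (seg.length : Int) - 1 = ((n - 1 - seg.length : Nat) : Int) := by omega
        rw [hidx, PySem.Int.mod_natCast, PySem.List.pyGet?_natCast,
            List.getElem?_eq_getElem hmodlt]
        rfl
      rw [hB]
      apply solWhile_eq_get S index _ a 0 (by omega)
      rw [show (index - 0).toNat - 1 = n - 1 by omega, hfil]
      rw [List.getElem?_append_left (by simp [hflatlen]; omega),
          List.getElem?_append_right (by omega),
          flatten_replicate_getElem? n (solAvail S) (n - 1 - seg.length) hj,
          List.getElem?_eq_getElem hmodlt]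

-- ===== VERDICT (by name: the statement is the Claim_ definition above) =====
theorem solution_spec : Claim_equal_solution := by
  unfold Claim_equal_solution
  intro s skip index hdom hpre
  unfold Spec_solution solution solution_alt
  apply congrArg String.ofList
  rw [List.map_map, List.map_map]
  apply List.map_congr_left
  intro c hc
  -- domain: every character of s has code ≤ 126
  have hcode : c.toNat ≤ 126 := by
    simp only [Dom_solution, pvDomStr, Bool.and_eq_true, List.all_eq_true] at hdom
    have := hdom.1.1 c hc
    simp [pvDomChar] at this
    omega
  set S : PySem.Set Int := PySem.Set.ofList (skip.toList.map (fun ch => (ch.toNat : Int))) with hS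
  -- Pre_ : the available alphabet is nonempty (or index ≤ 0)
  have hpre' : index ≤ 0 ∨ solAvail S ≠ [] := by
    rcases hpre with h | ⟨c0, hc0r, hc0n⟩
    · exact Or.inl h
    · refine Or.inr (List.ne_nil_of_mem (a := c0) ?_)
      refine List.mem_filter.mpr ⟨hc0r, ?_⟩
      simp only [hS, Bool.not_eq_eq_eq_not, Bool.not_true, ← Bool.not_eq_true,
        PySem.Set.contains_iff, PySem.Set.mem_ofList]
      exact hc0n
  -- table lookup
  have htab : (PySem.List.pyGet?
      ((PySem.List.pyRange 0 127 1).map (fun a => Char.ofNat (solDecode S index a).toNat))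
      ((c.toNat : Int))).getD ' '
      = Char.ofNat (solDecode S index (c.toNat : Int)).toNat := by
    rw [PySem.List.pyGet?_natCast]
    rw [show (127 : Int) = ((127 : Nat) : Int) by norm_num]
    rw [PySem.List.getElem?_map_pyRange_zero _ 127 c.toNat (by omega)]
    rfl
  simp only [Function.comp]
  rw [htab, char_eq S index (c.toNat : Int) (by positivity) hpre']
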